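-- pv_equiv track=rewrite | github.com/wptmdoorn/pubmedtoaudio | pubmedtoaudio/article.py | merge_section_list
-- ===== SOURCE A (Python) =====
-- SECTIONS_MAPS = {
--     'Abstract': 'Abstract',
--     'ABSTRACT': 'Abstract',
--     'INTRODUCTION': 'Introduction',
--     'MATERIALS AND METHODS': 'Methods',
--     'Materials and methods': 'Methods',
--     'METHODS': 'Methods',
--     'RESULTS': 'Results',
--     'CONCLUSIONS': 'Conclusions',
--     'CONCLUSIONS AND FUTURE APPLICATIONS': 'Conclusions',
--     'DISCUSSION': 'Discussion',
--     'ACKNOWLEDGMENTS': 'Acknowledgement',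
--     'TABLES': 'Tables',
--     'Tabnles': 'Tables',
--     'DISCLOSURE': 'Disclosure',
--     'CONFLICT OF INTEREST': 'Disclosure',
--     'Acknowledgement': 'Acknowledgements'
-- }
--
-- def merge_section_list(section_list, section_maps=SECTIONS_MAPS, section_start=''):
--     """
--     Merge a list of sections into a normalized list of sections,
--     you can get the list of sections from parsed article JSON in ``parse_pdf.py`` e.g.
--
--     >> section_list = [s['heading'] for s in article_json['sections']]
--     >> section_list_merged = merge_section_list(section_list)
--
--     Parameters
--     ==========
--     section_list: list, list of sections
--     Output
--     ======
--     section_list_merged: list,  sections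
--     """
--     sect_map = section_start # text for starting section e.g. ``Introduction``
--     section_list_merged = []
--     for section in section_list:
--         if any([(s.lower() in section.lower()) for s in section_maps.keys()]):
--             sect = [s for s in section_maps.keys() if s.lower() in section.lower()][0]
--             sect_map = section_maps.get(sect, '') #
--             section_list_merged.append(sect_map)
--         else:
--             section_list_merged.append(sect_map)
--     return section_list_merged
-- ===== SOURCE B (Python) =====
-- SECTIONS_MAPS = {
--     'Abstract': 'Abstract',
--     'ABSTRACT': 'Abstract',
--     'INTRODUCTION': 'Introduction',
--     'MATERIALS AND METHODS': 'Methods',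
--     'Materials and methods': 'Methods',
--     'METHODS': 'Methods',
--     'RESULTS': 'Results',
--     'CONCLUSIONS': 'Conclusions',
--     'CONCLUSIONS AND FUTURE APPLICATIONS': 'Conclusions',
--     'DISCUSSION': 'Discussion',
--     'ACKNOWLEDGMENTS': 'Acknowledgement',
--     'TABLES': 'Tables',
--     'Tabnles': 'Tables',
--     'DISCLOSURE': 'Disclosure',
--     'CONFLICT OF INTEREST': 'Disclosure',
--     'Acknowledgement': 'Acknowledgements'
-- }
--
-- def merge_section_list(section_list, section_maps=SECTIONS_MAPS, section_start=''):
--     # Sparse event list: (index, normalized value) for each heading that matches a key.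
--     events = []
--     for i, section in enumerate(section_list):
--         sec_l = section.lower()
--         for k, v in section_maps.items():
--             if k.lower() in sec_l:
--                 events.append((i, v))
--                 break
--     # Run-length expansion: fill the gaps between events with the last value seen.
--     out = []
--     prev = section_start
--     pos = 0
--     for i, v in events:
--         out.extend([prev] * (i - pos))
--         out.append(v)
--         prev = v
--         pos = i + 1
--     out.extend([prev] * (len(section_list) - pos))
--     return out
-- ===== Notes on version B (the rewrite author's own statement) =====
-- stated objective: alternative
-- what changed: A walks every heading once, re-scanning the keys twice per heading (any() then a full filter with [0]) while threading the running label; B first builds a sparse event list of (index, normalized value) for matching headings only, then reconstructs the output by run-length expansion, filling each gap between events with replicated copies of the last value.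
import Mathlib
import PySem

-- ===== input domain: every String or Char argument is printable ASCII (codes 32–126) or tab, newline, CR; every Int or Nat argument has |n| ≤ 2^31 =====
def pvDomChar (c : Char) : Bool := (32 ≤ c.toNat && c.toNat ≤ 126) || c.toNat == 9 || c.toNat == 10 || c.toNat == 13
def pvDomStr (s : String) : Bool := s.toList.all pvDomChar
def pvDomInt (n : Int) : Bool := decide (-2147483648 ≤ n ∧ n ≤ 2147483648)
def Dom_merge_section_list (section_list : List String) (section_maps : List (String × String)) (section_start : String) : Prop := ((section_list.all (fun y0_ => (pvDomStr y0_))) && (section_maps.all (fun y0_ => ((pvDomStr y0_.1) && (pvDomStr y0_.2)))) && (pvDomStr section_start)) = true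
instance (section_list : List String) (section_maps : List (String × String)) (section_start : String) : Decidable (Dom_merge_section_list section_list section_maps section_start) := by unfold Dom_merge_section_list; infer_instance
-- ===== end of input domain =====

-- B replaces A's threaded one-pass loop (two key scans per heading) by a sparse event list
-- of (index, normalized value) for matching headings, then run-length expansion of the gaps
-- (objective: alternative algorithm, same asymptotic cost).

-- ===== PORT A =====
-- A's `[s for s in keys if …][0]` is guarded by `any`, so the list is never empty;
-- `.headD ""` transliterates the `[0]` (the default is unreachable under the guard).
def merge_section_list (section_list : List String) (section_maps : List (String × String)) (section_start : String) : List String :=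
  let d := PySem.Dict.ofList section_maps
  (section_list.foldl (fun (st : String × List String) sec =>
    if d.keys.any (fun s => PySem.Str.isIn (PySem.Str.lower s) (PySem.Str.lower sec)) then
      let sect := ((d.keys.filter (fun s => PySem.Str.isIn (PySem.Str.lower s) (PySem.Str.lower sec))).headD "")
      let v := d.getD sect ""
      (v, st.2 ++ [v])
    else (st.1, st.2 ++ [st.1])) (section_start, [])).2

-- ===== PORT B =====
def merge_section_list_alt (section_list : List String) (section_maps : List (String × String)) (section_start : String) : List String :=
  let d := PySem.Dict.ofList section_maps
  -- pass 1: sparse event list (index, normalized value); `find?` is the inner for+break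
  let events := (PySem.List.enumerate section_list 0).foldl
    (fun (ev : List (Int × String)) p =>
      match d.items.find? (fun kv => PySem.Str.isIn (PySem.Str.lower kv.1) (PySem.Str.lower p.2)) with
      | some kv => ev ++ [(p.1, kv.2)]
      | none => ev) []
  -- pass 2: run-length expansion; `[prev] * n` is pyRepeat
  let st := events.foldl
    (fun (st : List String × String × Int) e =>
      (st.1 ++ PySem.List.pyRepeat [st.2.1] (e.1 - st.2.2) ++ [e.2], e.2, e.1 + 1))
    ([], section_start, 0)
  st.1 ++ PySem.List.pyRepeat [st.2.1] ((section_list.length : Int) - st.2.2)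

-- ===== PRECONDITION & SPEC =====
def Spec_merge_section_list (section_list : List String) (section_maps : List (String × String)) (section_start : String) (out : List String) : Prop := out = merge_section_list_alt section_list section_maps section_start
instance (section_list : List String) (section_maps : List (String × String)) (section_start : String) (out : List String) : Decidable (Spec_merge_section_list section_list section_maps section_start out) := by unfold Spec_merge_section_list; infer_instance

-- ===== CLAIM (what is proved, stated in full; the proofs are below) =====
def Claim_equal_merge_section_list : Prop := ∀ (section_list : List String) (section_maps : List (String × String)) (section_start : String), Dom_merge_section_list section_list section_maps section_start → Spec_merge_section_list section_list section_maps section_start (merge_section_list section_list section_maps section_start)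

-- ===== LEMMAS AND PROOFS =====

-- first matching value (shared characterisation of both programs' per-heading scan)
def pvMatch (d : PySem.Dict String String) (sec : String) : Option String :=
  (d.items.find? (fun kv => PySem.Str.isIn (PySem.Str.lower kv.1) (PySem.Str.lower sec))).map Prod.snd

-- forward-fill: the common specification both ports are reduced to
def pvFfill (cur : String) : List (Option String) → List String
  | [] => []
  | none :: t => cur :: pvFfill cur t
  | some v :: t => v :: pvFfill v t

-- the ideal event list of B's first pass
def pvEvts (d : PySem.Dict String String) : Int → List String → List (Int × String)
  | _, [] => []
  | i, s :: t =>
    match pvMatch d s with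
    | some v => (i, v) :: pvEvts d (i + 1) t
    | none => pvEvts d (i + 1) t

-- `any` over the mapped keys ↔ `find?` over the pairs succeeds
theorem pv_any_map_eq_isSome_find? {α β : Type} (l : List α) (g : α → β) (p : β → Bool) :
    (l.map g).any p = (l.find? (fun q => p (g q))).isSome := by
  induction l with
  | nil => simp
  | cons a t ih =>
    by_cases h : p (g a) = true <;> simp [h, ih]

-- the head of A's filtered key list is the key that find? returns
theorem pv_filter_headD_eq {α β : Type} [Inhabited β] (l : List α) (g : α → β) (p : β → Bool)
    (a : α) (h : l.find? (fun q => p (g q)) = some a) (d : β) :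
    ((l.map g).filter p).headD d = g a := by
  induction l with
  | nil => simp at h
  | cons x t ih =>
    by_cases hx : p (g x) = true
    · rw [List.find?_cons_of_pos (by simpa using hx)] at h
      cases h
      simp [hx]
    · rw [List.find?_cons_of_neg (by simpa using hx)] at h
      rw [List.map_cons, List.filter_cons_of_neg (by simpa using hx)]
      exact ih h

-- A's loop is forward-fill of the per-heading matches
theorem pv_A_eq_ffill (d : PySem.Dict String String) (hnd : d.keys.Nodup) :
    ∀ (sl : List String) (st : String × List String),
    (sl.foldl (fun (st : String × List String) sec =>
      if d.keys.any (fun s => PySem.Str.isIn (PySem.Str.lower s) (PySem.Str.lower sec)) then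
        let sect := ((d.keys.filter (fun s => PySem.Str.isIn (PySem.Str.lower s) (PySem.Str.lower sec))).headD "")
        let v := d.getD sect ""
        (v, st.2 ++ [v])
      else (st.1, st.2 ++ [st.1])) st).2
    = st.2 ++ pvFfill st.1 (sl.map (pvMatch d)) := by
  intro sl
  induction sl with
  | nil => intro st; simp [pvFfill]
  | cons sec t ih =>
    intro st
    rw [List.map_cons, List.foldl_cons]
    set p : String → Bool := fun s => PySem.Str.isIn (PySem.Str.lower s) (PySem.Str.lower sec) with hp
    have hk : d.keys = d.items.map Prod.fst := rfl
    have hany : d.keys.any p = (d.items.find? (fun q => p q.1)).isSome := by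
      rw [hk]; exact pv_any_map_eq_isSome_find? d.items Prod.fst p
    rcases hfind : d.items.find? (fun q => p q.1) with _ | ⟨k, v⟩
    · have hF : ¬ d.keys.any p = true := by rw [hany, hfind]; simp
      have hm : pvMatch d sec = none := by
        unfold pvMatch; rw [hp] at hfind; rw [hfind]; rfl
      rw [if_neg hF, ih, hm]
      simp [pvFfill]
    · have hT : d.keys.any p = true := by rw [hany, hfind]; rfl
      have hhead : (d.keys.filter p).headD "" = k := by
        rw [hk]; exact pv_filter_headD_eq d.items Prod.fst p (k, v) hfind ""
      have hmem : (k, v) ∈ d.items := List.mem_of_find?_eq_some hfind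
      have hget : d.getD k "" = v := PySem.Dict.getD_of_mem_items d hmem hnd ""
      have hm : pvMatch d sec = some v := by
        unfold pvMatch; rw [hp] at hfind; rw [hfind]; rfl
      rw [if_pos hT, ih, hm]
      simp only [pvFfill]
      have hhead' : (List.find? p d.keys).getD "" = k := by simpa using hhead
      simp [hhead', hget]

-- B's first pass builds the ideal event list
theorem pv_events_eq (d : PySem.Dict String String) :
    ∀ (sl : List String) (i : Int) (acc : List (Int × String)),
    ((PySem.List.enumerate sl i).foldl
      (fun (ev : List (Int × String)) p =>
        match d.items.find? (fun kv => PySem.Str.isIn (PySem.Str.lower kv.1) (PySem.Str.lower p.2)) with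
        | some kv => ev ++ [(p.1, kv.2)]
        | none => ev) acc)
    = acc ++ pvEvts d i sl := by
  intro sl
  induction sl with
  | nil => intro i acc; simp [PySem.List.enumerate_nil, pvEvts]
  | cons s t ih =>
    intro i acc
    rw [PySem.List.enumerate_cons, List.foldl_cons]
    rcases hfind : d.items.find? (fun kv => PySem.Str.isIn (PySem.Str.lower kv.1) (PySem.Str.lower s)) with _ | kv
    · have hm : pvMatch d s = none := by unfold pvMatch; rw [hfind]; rfl
      simp only [pvEvts, hfind, ih, hm]
    · have hm : pvMatch d s = some kv.2 := by unfold pvMatch; rw [hfind]; rfl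
      simp only [pvEvts, hfind, ih, hm, List.append_assoc, List.singleton_append]

-- every event index produced from start j is ≥ j
theorem pv_evts_ge (d : PySem.Dict String String) :
    ∀ (t : List String) (j : Int) (e : Int × String), e ∈ pvEvts d j t → j ≤ e.1 := by
  intro t
  induction t with
  | nil => intro j e h; simp [pvEvts] at h
  | cons s r ih =>
    intro j e h
    unfold pvEvts at h
    cases hm : pvMatch d s with
    | none => rw [hm] at h; have := ih (j + 1) e h; omega
    | some v =>
      rw [hm] at h
      rcases List.mem_cons.mp h with h1 | h1
      · subst h1; simp
      · have := ih (j + 1) e h1; omega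

-- B's expansion fold, packaged with its trailing fill
def pvExpand (E : List (Int × String)) (acc : List String) (prev : String) (p total : Int) : List String :=
  let st := E.foldl
    (fun (st : List String × String × Int) e =>
      (st.1 ++ PySem.List.pyRepeat [st.2.1] (e.1 - st.2.2) ++ [e.2], e.2, e.1 + 1))
    (acc, prev, p)
  st.1 ++ PySem.List.pyRepeat [st.2.1] (total - st.2.2)

-- skipping a non-matching heading: shift the start position by one, consuming one copy of prev
theorem pv_expand_shift (E : List (Int × String)) (acc : List String) (prev : String)
    (i total : Int) (hE : ∀ e ∈ E, i + 1 ≤ e.1) (ht : i + 1 ≤ total) :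
    pvExpand E acc prev i total = pvExpand E (acc ++ [prev]) prev (i + 1) total := by
  cases E with
  | nil =>
    unfold pvExpand
    simp only [List.foldl_nil, PySem.List.pyRepeat_singleton]
    have h1 : (total - i).toNat = (total - (i + 1)).toNat + 1 := by omega
    rw [h1, List.replicate_succ]
    simp
  | cons e r =>
    have he : i + 1 ≤ e.1 := hE e (by simp)
    unfold pvExpand
    simp only [List.foldl_cons, PySem.List.pyRepeat_singleton]
    have h1 : (e.1 - i).toNat = (e.1 - (i + 1)).toNat + 1 := by omega
    rw [h1, List.replicate_succ]
    simp

-- run-length expansion of the event list is forward-fill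
theorem pv_expand_eq_ffill (d : PySem.Dict String String) :
    ∀ (sl : List String) (i : Int) (acc : List String) (prev : String),
    pvExpand (pvEvts d i sl) acc prev i (i + sl.length) = acc ++ pvFfill prev (sl.map (pvMatch d)) := by
  intro sl
  induction sl with
  | nil =>
    intro i acc prev
    unfold pvExpand
    simp [pvEvts, pvFfill, PySem.List.pyRepeat_singleton]
  | cons s t ih =>
    intro i acc prev
    rw [List.map_cons]
    unfold pvEvts
    rcases hm : pvMatch d s with _ | v <;> simp only [pvFfill]
    · rw [pv_expand_shift _ _ _ _ _ (fun e he => pv_evts_ge d t (i + 1) e he) (by simp only [List.length_cons]; omega)]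
      rw [show (i + ((s :: t).length : Int)) = (i + 1) + (t.length : Int) by push_cast [List.length_cons]; ring]
      rw [ih (i + 1) (acc ++ [prev]) prev]
      simp
    · have hstep : pvExpand ((i, v) :: pvEvts d (i + 1) t) acc prev i (i + ((s :: t).length : Int))
          = pvExpand (pvEvts d (i + 1) t) (acc ++ [v]) v (i + 1) (i + ((s :: t).length : Int)) := by
        unfold pvExpand
        simp [PySem.List.pyRepeat_singleton]
      rw [hstep, show (i + ((s :: t).length : Int)) = (i + 1) + (t.length : Int) by simp; ring]
      rw [ih (i + 1) (acc ++ [v]) v]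
      simp

-- ===== VERDICT (by name: the statement is the Claim_ definition above) =====
theorem merge_section_list_spec : Claim_equal_merge_section_list := by
  intro section_list section_maps section_start _
  unfold Spec_merge_section_list
  simp only [merge_section_list, merge_section_list_alt]
  rw [pv_A_eq_ffill (PySem.Dict.ofList section_maps) (PySem.Dict.nodup_keys_ofList section_maps)]
  rw [pv_events_eq (PySem.Dict.ofList section_maps) section_list 0 []]
  have := pv_expand_eq_ffill (PySem.Dict.ofList section_maps) section_list 0 [] section_start
  unfold pvExpand at this
  simpa using this.symm
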